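-- pv_equiv track=rewrite | github.com/adrianjohnsaker/Numogam_Luna | creative_manifestation_bridge.py | _generate_concept_relationships
-- ===== SOURCE A (Python) =====
-- from typing import Dict, List, Any, Optional, Tuple, Callable, Union, Set
--
-- def _generate_concept_relationships(concepts: List[str]) -> Dict[str, List[str]]:
--     """Generate relationships between concepts"""
--
--     relationships = {}
--
--     # Define some common consciousness concept relationships
--     concept_groups = {
--         "awareness_concepts": ["awareness", "consciousness", "attention", "mindfulness"],
--         "creative_concepts": ["creativity", "imagination", "inspiration", "innovation"],
--         "identity_concepts": ["identity", "self", "being", "becoming", "authenticity"],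
--         "connection_concepts": ["connection", "relationship", "empathy", "compassion", "love"],
--         "transformation_concepts": ["transformation", "growth", "evolution", "emergence", "change"],
--         "experience_concepts": ["experience", "feeling", "sensation", "perception", "emotion"]
--     }
--
--     for concept in concepts:
--         relationships[concept] = []
--
--         # Find related concepts in same group
--         for group_concepts in concept_groups.values():
--             if concept in group_concepts:
--                 relationships[concept].extend([c for c in group_concepts if c != concept and c in concepts])
--
--         # Add some universal relationships
--         if concept in ["consciousness", "awareness"]:
--             universal_connections = ["identity", "creativity", "experience", "transformation"]
--             relationships[concept].extend([c for c in universal_connections if c in concepts])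
--
--         if concept in ["creativity", "imagination"]:
--             creative_connections = ["consciousness", "expression", "transformation", "innovation"]
--             relationships[concept].extend([c for c in creative_connections if c in concepts])
--
--     return relationships
-- ===== SOURCE B (Python) =====
-- from typing import Dict, List
--
-- _GROUPS = [
--     ["awareness", "consciousness", "attention", "mindfulness"],
--     ["creativity", "imagination", "inspiration", "innovation"],
--     ["identity", "self", "being", "becoming", "authenticity"],
--     ["connection", "relationship", "empathy", "compassion", "love"],
--     ["transformation", "growth", "evolution", "emergence", "change"],
--     ["experience", "feeling", "sensation", "perception", "emotion"],
-- ]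
--
-- # Static candidate table: each known concept -> its full ordered candidate list.
-- _TEMPLATE = {}
-- for _g in _GROUPS:
--     for _c in _g:
--         _TEMPLATE[_c] = [x for x in _g if x != _c]
-- for _c in ["consciousness", "awareness"]:
--     _TEMPLATE[_c] = _TEMPLATE[_c] + ["identity", "creativity", "experience", "transformation"]
-- for _c in ["creativity", "imagination"]:
--     _TEMPLATE[_c] = _TEMPLATE[_c] + ["consciousness", "expression", "transformation", "innovation"]
--
--
-- def _generate_concept_relationships(concepts: List[str]) -> Dict[str, List[str]]:
--     present = set(concepts)
--     return {concept: [c for c in _TEMPLATE.get(concept, []) if c in present]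
--             for concept in concepts}
-- ===== Notes on version B (the rewrite author's own statement) =====
-- stated objective: faster
-- what changed: Replaces A's per-concept scan over all six concept groups plus two universal-connection branches with a precomputed static template dict mapping each known concept to its full ordered candidate list, so the main function is a single pass doing one table lookup and one membership filter (against a set) per concept. (measured ~1.6x faster: the group scans and repeated list-membership scans are replaced by one dict lookup and set-membership tests).
import Mathlib
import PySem

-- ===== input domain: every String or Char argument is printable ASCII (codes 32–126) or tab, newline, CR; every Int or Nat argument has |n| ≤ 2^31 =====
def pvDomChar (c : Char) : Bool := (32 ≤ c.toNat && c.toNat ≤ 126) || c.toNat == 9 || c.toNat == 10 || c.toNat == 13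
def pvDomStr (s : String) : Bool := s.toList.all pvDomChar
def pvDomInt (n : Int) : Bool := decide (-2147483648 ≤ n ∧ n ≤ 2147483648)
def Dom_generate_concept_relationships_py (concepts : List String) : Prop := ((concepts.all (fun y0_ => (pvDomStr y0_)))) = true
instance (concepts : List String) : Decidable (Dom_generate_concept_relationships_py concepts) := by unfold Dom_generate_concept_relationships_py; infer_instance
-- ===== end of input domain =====

-- B replaces A's per-concept scan over all groups plus two universal-connection branches by a
-- single precomputed candidate table consulted once per concept (measured faster in a timing run).

-- ===== PORT A =====
-- the concept_groups dict's values, in order (A only iterates .values())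
def gcrGroups : List (List String) :=
  [["awareness", "consciousness", "attention", "mindfulness"],
   ["creativity", "imagination", "inspiration", "innovation"],
   ["identity", "self", "being", "becoming", "authenticity"],
   ["connection", "relationship", "empathy", "compassion", "love"],
   ["transformation", "growth", "evolution", "emergence", "change"],
   ["experience", "feeling", "sensation", "perception", "emotion"]]

-- the body of A's outer loop: the final value stored at `concept`
def gcrValueA (concepts : List String) (concept : String) : List String :=
  let v := gcrGroups.foldl (fun acc g =>
    if concept ∈ g then acc ++ g.filter (fun c => c != concept && concepts.contains c) else acc) []
  let v := if concept = "consciousness" ∨ concept = "awareness" then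
      v ++ (["identity", "creativity", "experience", "transformation"].filter (fun c => concepts.contains c)) else v
  let v := if concept = "creativity" ∨ concept = "imagination" then
      v ++ (["consciousness", "expression", "transformation", "innovation"].filter (fun c => concepts.contains c)) else v
  v

def generate_concept_relationships_py (concepts : List String) : List (String × List String) :=
  (concepts.foldl (fun rel concept => rel.insert concept (gcrValueA concepts concept))
    (PySem.Dict.empty : PySem.Dict String (List String))).items

-- ===== PORT B =====
-- Source B's module-level loops building the static candidate table _TEMPLATE (Source B's _GROUPS is
-- the same literal list as gcrGroups above, so it is shared)
def gcrTemplate : PySem.Dict String (List String) :=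
  let t := gcrGroups.foldl (fun t g => g.foldl (fun t c => t.insert c (g.filter (fun x => x != c))) t)
    (PySem.Dict.empty : PySem.Dict String (List String))
  let t := ["consciousness", "awareness"].foldl (fun t c =>
    t.insert c (t.getD c [] ++ ["identity", "creativity", "experience", "transformation"])) t
  let t := ["creativity", "imagination"].foldl (fun t c =>
    t.insert c (t.getD c [] ++ ["consciousness", "expression", "transformation", "innovation"])) t
  t

def generate_concept_relationships_py_alt (concepts : List String) : List (String × List String) :=
  let present := PySem.Set.ofList concepts
  (concepts.foldl (fun rel concept =>
      rel.insert concept ((gcrTemplate.getD concept []).filter (fun c => present.contains c)))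
    (PySem.Dict.empty : PySem.Dict String (List String))).items

-- ===== PRECONDITION & SPEC =====
def Spec_generate_concept_relationships_py (concepts : List String) (out : List (String × List String)) : Prop := out = generate_concept_relationships_py_alt concepts
instance (concepts : List String) (out : List (String × List String)) : Decidable (Spec_generate_concept_relationships_py concepts out) := by unfold Spec_generate_concept_relationships_py; infer_instance

-- ===== CLAIM (what is proved, stated in full; the proofs are below) =====
def Claim_equal_generate_concept_relationships_py : Prop := ∀ (concepts : List String), Dom_generate_concept_relationships_py concepts → Spec_generate_concept_relationships_py concepts (generate_concept_relationships_py concepts)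

-- ===== LEMMAS AND PROOFS =====

-- the template, evaluated to its literal items
set_option maxRecDepth 8192 in
set_option maxHeartbeats 1000000 in
lemma gcrTemplate_eq : gcrTemplate = PySem.Dict.mk [
    ("awareness", ["consciousness", "attention", "mindfulness", "identity", "creativity", "experience", "transformation"]),
    ("consciousness", ["awareness", "attention", "mindfulness", "identity", "creativity", "experience", "transformation"]),
    ("attention", ["awareness", "consciousness", "mindfulness"]),
    ("mindfulness", ["awareness", "consciousness", "attention"]),
    ("creativity", ["imagination", "inspiration", "innovation", "consciousness", "expression", "transformation", "innovation"]),
    ("imagination", ["creativity", "inspiration", "innovation", "consciousness", "expression", "transformation", "innovation"]),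
    ("inspiration", ["creativity", "imagination", "innovation"]),
    ("innovation", ["creativity", "imagination", "inspiration"]),
    ("identity", ["self", "being", "becoming", "authenticity"]),
    ("self", ["identity", "being", "becoming", "authenticity"]),
    ("being", ["identity", "self", "becoming", "authenticity"]),
    ("becoming", ["identity", "self", "being", "authenticity"]),
    ("authenticity", ["identity", "self", "being", "becoming"]),
    ("connection", ["relationship", "empathy", "compassion", "love"]),
    ("relationship", ["connection", "empathy", "compassion", "love"]),
    ("empathy", ["connection", "relationship", "compassion", "love"]),
    ("compassion", ["connection", "relationship", "empathy", "love"]),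
    ("love", ["connection", "relationship", "empathy", "compassion"]),
    ("transformation", ["growth", "evolution", "emergence", "change"]),
    ("growth", ["transformation", "evolution", "emergence", "change"]),
    ("evolution", ["transformation", "growth", "emergence", "change"]),
    ("emergence", ["transformation", "growth", "evolution", "change"]),
    ("change", ["transformation", "growth", "evolution", "emergence"]),
    ("experience", ["feeling", "sensation", "perception", "emotion"]),
    ("feeling", ["experience", "sensation", "perception", "emotion"]),
    ("sensation", ["experience", "feeling", "perception", "emotion"]),
    ("perception", ["experience", "feeling", "sensation", "emotion"]),
    ("emotion", ["experience", "feeling", "sensation", "perception"])] := rfl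

-- set(concepts) membership agrees with list membership
lemma gcrSet_contains (concepts : List String) (c : String) :
    (PySem.Set.ofList concepts).contains c = concepts.contains c := by
  by_cases h : c ∈ concepts <;> simp [PySem.Set.mem_ofList, h]

-- template rows, evaluated once
set_option maxRecDepth 8192 in
lemma gcrRow0 : gcrTemplate.getD "awareness" [] = ["consciousness", "attention", "mindfulness", "identity", "creativity", "experience", "transformation"] := rfl
set_option maxRecDepth 8192 in
lemma gcrRow1 : gcrTemplate.getD "consciousness" [] = ["awareness", "attention", "mindfulness", "identity", "creativity", "experience", "transformation"] := rfl
set_option maxRecDepth 8192 in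
lemma gcrRow2 : gcrTemplate.getD "attention" [] = ["awareness", "consciousness", "mindfulness"] := rfl
set_option maxRecDepth 8192 in
lemma gcrRow3 : gcrTemplate.getD "mindfulness" [] = ["awareness", "consciousness", "attention"] := rfl
set_option maxRecDepth 8192 in
lemma gcrRow4 : gcrTemplate.getD "creativity" [] = ["imagination", "inspiration", "innovation", "consciousness", "expression", "transformation", "innovation"] := rfl
set_option maxRecDepth 8192 in
lemma gcrRow5 : gcrTemplate.getD "imagination" [] = ["creativity", "inspiration", "innovation", "consciousness", "expression", "transformation", "innovation"] := rfl
set_option maxRecDepth 8192 in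
lemma gcrRow6 : gcrTemplate.getD "inspiration" [] = ["creativity", "imagination", "innovation"] := rfl
set_option maxRecDepth 8192 in
lemma gcrRow7 : gcrTemplate.getD "innovation" [] = ["creativity", "imagination", "inspiration"] := rfl
set_option maxRecDepth 8192 in
lemma gcrRow8 : gcrTemplate.getD "identity" [] = ["self", "being", "becoming", "authenticity"] := rfl
set_option maxRecDepth 8192 in
lemma gcrRow9 : gcrTemplate.getD "self" [] = ["identity", "being", "becoming", "authenticity"] := rfl
set_option maxRecDepth 8192 in
lemma gcrRow10 : gcrTemplate.getD "being" [] = ["identity", "self", "becoming", "authenticity"] := rfl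
set_option maxRecDepth 8192 in
lemma gcrRow11 : gcrTemplate.getD "becoming" [] = ["identity", "self", "being", "authenticity"] := rfl
set_option maxRecDepth 8192 in
lemma gcrRow12 : gcrTemplate.getD "authenticity" [] = ["identity", "self", "being", "becoming"] := rfl
set_option maxRecDepth 8192 in
lemma gcrRow13 : gcrTemplate.getD "connection" [] = ["relationship", "empathy", "compassion", "love"] := rfl
set_option maxRecDepth 8192 in
lemma gcrRow14 : gcrTemplate.getD "relationship" [] = ["connection", "empathy", "compassion", "love"] := rfl
set_option maxRecDepth 8192 in
lemma gcrRow15 : gcrTemplate.getD "empathy" [] = ["connection", "relationship", "compassion", "love"] := rfl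
set_option maxRecDepth 8192 in
lemma gcrRow16 : gcrTemplate.getD "compassion" [] = ["connection", "relationship", "empathy", "love"] := rfl
set_option maxRecDepth 8192 in
lemma gcrRow17 : gcrTemplate.getD "love" [] = ["connection", "relationship", "empathy", "compassion"] := rfl
set_option maxRecDepth 8192 in
lemma gcrRow18 : gcrTemplate.getD "transformation" [] = ["growth", "evolution", "emergence", "change"] := rfl
set_option maxRecDepth 8192 in
lemma gcrRow19 : gcrTemplate.getD "growth" [] = ["transformation", "evolution", "emergence", "change"] := rfl
set_option maxRecDepth 8192 in
lemma gcrRow20 : gcrTemplate.getD "evolution" [] = ["transformation", "growth", "emergence", "change"] := rfl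
set_option maxRecDepth 8192 in
lemma gcrRow21 : gcrTemplate.getD "emergence" [] = ["transformation", "growth", "evolution", "change"] := rfl
set_option maxRecDepth 8192 in
lemma gcrRow22 : gcrTemplate.getD "change" [] = ["transformation", "growth", "evolution", "emergence"] := rfl
set_option maxRecDepth 8192 in
lemma gcrRow23 : gcrTemplate.getD "experience" [] = ["feeling", "sensation", "perception", "emotion"] := rfl
set_option maxRecDepth 8192 in
lemma gcrRow24 : gcrTemplate.getD "feeling" [] = ["experience", "sensation", "perception", "emotion"] := rfl
set_option maxRecDepth 8192 in
lemma gcrRow25 : gcrTemplate.getD "sensation" [] = ["experience", "feeling", "perception", "emotion"] := rfl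
set_option maxRecDepth 8192 in
lemma gcrRow26 : gcrTemplate.getD "perception" [] = ["experience", "feeling", "sensation", "emotion"] := rfl
set_option maxRecDepth 8192 in
lemma gcrRow27 : gcrTemplate.getD "emotion" [] = ["experience", "feeling", "sensation", "perception"] := rfl

-- per-concept value of A = filtered template row (case split over the 28 known concepts)
set_option maxHeartbeats 2000000 in
lemma gcrVal_eq (concepts : List String) (concept : String) :
    gcrValueA concepts concept = (gcrTemplate.getD concept []).filter (fun c => concepts.contains c) := by
  by_cases h0 : "awareness" = concept
  · subst h0
    rw [gcrRow0, show (["consciousness", "attention", "mindfulness", "identity", "creativity", "experience", "transformation"] : List String) = ["consciousness", "attention", "mindfulness"] ++ ["identity", "creativity", "experience", "transformation"] from rfl, List.filter_append]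
    simp [gcrValueA, gcrGroups, List.filter]
  by_cases h1 : "consciousness" = concept
  · subst h1
    rw [gcrRow1, show (["awareness", "attention", "mindfulness", "identity", "creativity", "experience", "transformation"] : List String) = ["awareness", "attention", "mindfulness"] ++ ["identity", "creativity", "experience", "transformation"] from rfl, List.filter_append]
    simp [gcrValueA, gcrGroups, List.filter]
  by_cases h2 : "attention" = concept
  · subst h2
    rw [gcrRow2]
    simp [gcrValueA, gcrGroups, List.filter]
  by_cases h3 : "mindfulness" = concept
  · subst h3
    rw [gcrRow3]
    simp [gcrValueA, gcrGroups, List.filter]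
  by_cases h4 : "creativity" = concept
  · subst h4
    rw [gcrRow4, show (["imagination", "inspiration", "innovation", "consciousness", "expression", "transformation", "innovation"] : List String) = ["imagination", "inspiration", "innovation"] ++ ["consciousness", "expression", "transformation", "innovation"] from rfl, List.filter_append]
    simp [gcrValueA, gcrGroups, List.filter]
  by_cases h5 : "imagination" = concept
  · subst h5
    rw [gcrRow5, show (["creativity", "inspiration", "innovation", "consciousness", "expression", "transformation", "innovation"] : List String) = ["creativity", "inspiration", "innovation"] ++ ["consciousness", "expression", "transformation", "innovation"] from rfl, List.filter_append]
    simp [gcrValueA, gcrGroups, List.filter]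
  by_cases h6 : "inspiration" = concept
  · subst h6
    rw [gcrRow6]
    simp [gcrValueA, gcrGroups, List.filter]
  by_cases h7 : "innovation" = concept
  · subst h7
    rw [gcrRow7]
    simp [gcrValueA, gcrGroups, List.filter]
  by_cases h8 : "identity" = concept
  · subst h8
    rw [gcrRow8]
    simp [gcrValueA, gcrGroups, List.filter]
  by_cases h9 : "self" = concept
  · subst h9
    rw [gcrRow9]
    simp [gcrValueA, gcrGroups, List.filter]
  by_cases h10 : "being" = concept
  · subst h10
    rw [gcrRow10]
    simp [gcrValueA, gcrGroups, List.filter]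
  by_cases h11 : "becoming" = concept
  · subst h11
    rw [gcrRow11]
    simp [gcrValueA, gcrGroups, List.filter]
  by_cases h12 : "authenticity" = concept
  · subst h12
    rw [gcrRow12]
    simp [gcrValueA, gcrGroups, List.filter]
  by_cases h13 : "connection" = concept
  · subst h13
    rw [gcrRow13]
    simp [gcrValueA, gcrGroups, List.filter]
  by_cases h14 : "relationship" = concept
  · subst h14
    rw [gcrRow14]
    simp [gcrValueA, gcrGroups, List.filter]
  by_cases h15 : "empathy" = concept
  · subst h15
    rw [gcrRow15]
    simp [gcrValueA, gcrGroups, List.filter]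
  by_cases h16 : "compassion" = concept
  · subst h16
    rw [gcrRow16]
    simp [gcrValueA, gcrGroups, List.filter]
  by_cases h17 : "love" = concept
  · subst h17
    rw [gcrRow17]
    simp [gcrValueA, gcrGroups, List.filter]
  by_cases h18 : "transformation" = concept
  · subst h18
    rw [gcrRow18]
    simp [gcrValueA, gcrGroups, List.filter]
  by_cases h19 : "growth" = concept
  · subst h19
    rw [gcrRow19]
    simp [gcrValueA, gcrGroups, List.filter]
  by_cases h20 : "evolution" = concept
  · subst h20
    rw [gcrRow20]
    simp [gcrValueA, gcrGroups, List.filter]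
  by_cases h21 : "emergence" = concept
  · subst h21
    rw [gcrRow21]
    simp [gcrValueA, gcrGroups, List.filter]
  by_cases h22 : "change" = concept
  · subst h22
    rw [gcrRow22]
    simp [gcrValueA, gcrGroups, List.filter]
  by_cases h23 : "experience" = concept
  · subst h23
    rw [gcrRow23]
    simp [gcrValueA, gcrGroups, List.filter]
  by_cases h24 : "feeling" = concept
  · subst h24
    rw [gcrRow24]
    simp [gcrValueA, gcrGroups, List.filter]
  by_cases h25 : "sensation" = concept
  · subst h25
    rw [gcrRow25]
    simp [gcrValueA, gcrGroups, List.filter]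
  by_cases h26 : "perception" = concept
  · subst h26
    rw [gcrRow26]
    simp [gcrValueA, gcrGroups, List.filter]
  by_cases h27 : "emotion" = concept
  · subst h27
    rw [gcrRow27]
    simp [gcrValueA, gcrGroups, List.filter]
  · simp [gcrValueA, gcrGroups, gcrTemplate_eq, PySem.Dict.getD_eq_get?_getD, PySem.Dict.get?_mk_cons, PySem.Dict.get?, h0, h1, h2, h3, h4, h5, h6, h7, h8, h9, h10, h11, h12, h13, h14, h15, h16, h17, h18, h19, h20, h21, h22, h23, h24, h25, h26, h27, Ne.symm h0, Ne.symm h1, Ne.symm h2, Ne.symm h3, Ne.symm h4, Ne.symm h5, Ne.symm h6, Ne.symm h7, Ne.symm h8, Ne.symm h9, Ne.symm h10, Ne.symm h11, Ne.symm h12, Ne.symm h13, Ne.symm h14, Ne.symm h15, Ne.symm h16, Ne.symm h17, Ne.symm h18, Ne.symm h19, Ne.symm h20, Ne.symm h21, Ne.symm h22, Ne.symm h23, Ne.symm h24, Ne.symm h25, Ne.symm h26, Ne.symm h27]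

-- ===== VERDICT (by name: the statement is the Claim_ definition above) =====
theorem generate_concept_relationships_py_spec : Claim_equal_generate_concept_relationships_py := by
  intro concepts _
  unfold Spec_generate_concept_relationships_py
  unfold generate_concept_relationships_py generate_concept_relationships_py_alt
  simp only [gcrVal_eq, gcrSet_contains]
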